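-- pv_equiv track=rewrite | github.com/utanashati/twitter-sentiment-analysis | src/utils.py | get_lengths_distrs
-- ===== SOURCE A (Python) =====
-- def get_lengths_distrs(tweets_tokd, max_lengths):
-- 	max_words_tweet, max_chars_word = max_lengths
-- 	words_tweet = [0] * max_words_tweet
-- 	chars_word = [0] * max_chars_word
-- 	for tweet in tweets_tokd:
-- 		words_tweet[len(tweet)-1] += 1
-- 		for word in tweet:
-- 			chars_word[len(word)-1] += 1
--
-- 	return words_tweet, chars_word
-- ===== SOURCE B (Python) =====
-- def get_lengths_distrs(tweets_tokd, max_lengths):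
--     max_words_tweet, max_chars_word = max_lengths
--
--     def one_hot(size, k):
--         v = [0] * size
--         v[k] = 1
--         return v
--
--     def vadd(u, v):
--         return [x + y for x, y in zip(u, v)]
--
--     def go(lo, hi):
--         # histograms of tweets_tokd[lo:hi], by divide and conquer with merge
--         if hi <= lo:
--             return [0] * max_words_tweet, [0] * max_chars_word
--         if hi - lo == 1:
--             tweet = tweets_tokd[lo]
--             words = one_hot(max_words_tweet, len(tweet) - 1)
--             chars = [0] * max_chars_word
--             for word in tweet:
--                 chars = vadd(chars, one_hot(max_chars_word, len(word) - 1))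
--             return words, chars
--         mid = (lo + hi) // 2
--         w1, c1 = go(lo, mid)
--         w2, c2 = go(mid, hi)
--         return vadd(w1, w2), vadd(c1, c2)
--
--     return go(0, len(tweets_tokd))
-- ===== Notes on version B (the rewrite author's own statement) =====
-- stated objective: alternative
-- what changed: A walks the data element-by-element incrementing cells of two preallocated tables in place; B is a divide-and-conquer over the tweet list that builds a one-hot vector per length key and merges sub-histograms by elementwise vector addition, never mutating a table.
import Mathlib
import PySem

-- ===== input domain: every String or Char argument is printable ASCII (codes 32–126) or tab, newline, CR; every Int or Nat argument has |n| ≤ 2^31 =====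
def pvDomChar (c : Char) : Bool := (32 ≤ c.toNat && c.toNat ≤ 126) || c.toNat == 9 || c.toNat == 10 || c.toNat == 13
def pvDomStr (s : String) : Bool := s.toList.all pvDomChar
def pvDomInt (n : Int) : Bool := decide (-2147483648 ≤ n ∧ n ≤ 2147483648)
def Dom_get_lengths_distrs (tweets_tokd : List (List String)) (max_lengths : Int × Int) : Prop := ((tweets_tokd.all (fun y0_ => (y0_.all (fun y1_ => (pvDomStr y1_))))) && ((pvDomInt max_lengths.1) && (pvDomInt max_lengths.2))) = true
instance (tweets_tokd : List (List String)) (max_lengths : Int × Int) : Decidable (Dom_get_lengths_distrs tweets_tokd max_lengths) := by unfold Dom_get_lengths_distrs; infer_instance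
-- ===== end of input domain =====

-- B replaces A's element-by-element in-place table increments with a divide-and-conquer that
-- builds a one-hot vector per length key and merges sub-histograms by elementwise addition.

-- ===== PORT A =====
-- A-side helper: Python's augmented assignment 'xs[i] += 1' (negative i indexes from the end;
-- out-of-range i is an IndexError in Python, excluded by Pre_ below).
def pyInc (xs : List Int) (i : Int) : List Int :=
  PySem.List.pySetD xs i (PySem.List.pyGetD xs i 0 + 1)

def get_lengths_distrs (tweets_tokd : List (List String)) (max_lengths : Int × Int) : List Int × List Int :=
  let max_words_tweet := max_lengths.1
  let max_chars_word := max_lengths.2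
  let words_tweet : List Int := List.replicate max_words_tweet.toNat 0   -- [0] * max_words_tweet
  let chars_word : List Int := List.replicate max_chars_word.toNat 0    -- [0] * max_chars_word
  tweets_tokd.foldl
    (fun st tweet =>
      (pyInc st.1 (PySem.List.len tweet - 1),
       tweet.foldl (fun cs word => pyInc cs (PySem.Str.len word - 1)) st.2))
    (words_tweet, chars_word)

-- ===== PORT B =====
-- B-side helpers: one_hot(size, k) ('v = [0]*size; v[k] = 1'; invalid k is Python's IndexError,
-- outside Pre_) and vadd (elementwise '[x + y for x, y in zip(u, v)]').
def oneHot (size : Int) (k : Int) : List Int :=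
  PySem.List.pySetD (List.replicate size.toNat 0) k 1

def vadd (u v : List Int) : List Int :=
  List.zipWith (· + ·) u v

-- used by go's decreasing_by: the midpoint of a gap of size ≥ 2 splits it strictly
lemma pvMid_bounds (lo hi : Int) (h2 : ¬hi - lo ≤ 0) (h3 : ¬hi - lo = 1) :
    lo < PySem.Int.floordiv (lo + hi) 2 ∧ PySem.Int.floordiv (lo + hi) 2 < hi := by
  constructor
  · have h := (PySem.Int.le_floordiv_iff_mul_le (a := lo + hi) (b := 2) (q := lo + 1) (by omega)).mpr (by omega)
    omega
  · exact (PySem.Int.floordiv_lt_iff_lt_mul (a := lo + hi) (b := 2) (q := hi) (by omega)).mpr (by omega)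

-- go(lo, hi): the divide-and-conquer of B
def gldGo (tweets_tokd : List (List String)) (max_words_tweet max_chars_word : Int) (lo hi : Int) : List Int × List Int :=
  if hle : hi - lo ≤ 0 then
    (List.replicate max_words_tweet.toNat 0, List.replicate max_chars_word.toNat 0)
  else if h1 : hi - lo = 1 then
    let tweet := PySem.List.pyGetD tweets_tokd lo []   -- tweets_tokd[lo]; in range for go's call pattern
    (oneHot max_words_tweet (PySem.List.len tweet - 1),
     tweet.foldl (fun cs word => vadd cs (oneHot max_chars_word (PySem.Str.len word - 1)))
       (List.replicate max_chars_word.toNat 0))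
  else
    let mid := PySem.Int.floordiv (lo + hi) 2
    let p1 := gldGo tweets_tokd max_words_tweet max_chars_word lo mid
    let p2 := gldGo tweets_tokd max_words_tweet max_chars_word mid hi
    (vadd p1.1 p2.1, vadd p1.2 p2.2)
termination_by (hi - lo).toNat
decreasing_by
  · have := pvMid_bounds lo hi hle h1; omega
  · have := pvMid_bounds lo hi hle h1; omega

def get_lengths_distrs_alt (tweets_tokd : List (List String)) (max_lengths : Int × Int) : List Int × List Int :=
  gldGo tweets_tokd max_lengths.1 max_lengths.2 0 (PySem.List.len tweets_tokd)

-- ===== PRECONDITION & SPEC =====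
-- Pre_ excludes exactly the inputs on which Python A raises IndexError: a tweet (resp. word)
-- whose length exceeds max_words_tweet (resp. max_chars_word), or a non-positive bound while
-- the corresponding bin must be incremented.
def Pre_get_lengths_distrs (tweets_tokd : List (List String)) (max_lengths : Int × Int) : Prop :=
  ∀ t ∈ tweets_tokd, ((1:Int) ≤ max_lengths.1 ∧ PySem.List.len t ≤ max_lengths.1) ∧
    ∀ w ∈ t, (1:Int) ≤ max_lengths.2 ∧ PySem.Str.len w ≤ max_lengths.2

instance (tweets_tokd : List (List String)) (max_lengths : Int × Int) : Decidable (Pre_get_lengths_distrs tweets_tokd max_lengths) := by unfold Pre_get_lengths_distrs; infer_instance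

def pvWitness_get_lengths_distrs : List (List String) × (Int × Int) := ([["ab"], []], (2, 3))

def Spec_get_lengths_distrs (tweets_tokd : List (List String)) (max_lengths : Int × Int) (out : List Int × List Int) : Prop := out = get_lengths_distrs_alt tweets_tokd max_lengths
instance (tweets_tokd : List (List String)) (max_lengths : Int × Int) (out : List Int × List Int) : Decidable (Spec_get_lengths_distrs tweets_tokd max_lengths out) := by unfold Spec_get_lengths_distrs; infer_instance

-- ===== CLAIM (what is proved, stated in full; the proofs are below) =====
def Claim_equal_get_lengths_distrs : Prop := ∀ (tweets_tokd : List (List String)) (max_lengths : Int × Int), Dom_get_lengths_distrs tweets_tokd max_lengths → Pre_get_lengths_distrs tweets_tokd max_lengths → Spec_get_lengths_distrs tweets_tokd max_lengths (get_lengths_distrs tweets_tokd max_lengths)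

-- ===== LEMMAS AND PROOFS =====

-- A Python index k with -n ≤ k < n resolves to the cell (k % n).toNat.
lemma pyIdx?_eq_emod (n : Nat) (k : Int) (h1 : -(n:Int) ≤ k) (h2 : k < n) :
    PySem.List.pyIdx? n k = some (k % (n:Int)).toNat := by
  simp only [PySem.List.pyIdx?]
  by_cases h0 : 0 ≤ k
  · rw [if_pos h0, if_pos h2, Int.emod_eq_of_lt h0 h2]
  · have hkn : (k + n) % (n:Int) = k % (n:Int) := by
      have h := Int.add_mul_emod_self_left (a := k) (b := (n:Int)) (c := 1)
      rw [mul_one] at h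
      exact h
    have hneg : k % (n:Int) = k + n := by
      rw [← hkn]; exact Int.emod_eq_of_lt (by omega) (by omega)
    rw [if_neg h0, if_pos h1, hneg]
    simp only [Option.some.injEq]
    omega

lemma pyInc_eq_set (l : List Int) (k : Int) (h1 : -(l.length:Int) ≤ k) (h2 : k < l.length) :
    pyInc l k = l.set (k % (l.length:Int)).toNat (l.getD (k % (l.length:Int)).toNat 0 + 1) := by
  simp only [pyInc, PySem.List.pySetD, PySem.List.pySet?, PySem.List.pyGetD, PySem.List.pyGet?,
    pyIdx?_eq_emod l.length k h1 h2, Option.map_some, Option.getD_some, Option.bind_some]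
  rw [List.getD_eq_getElem?_getD]

lemma length_pyInc (l : List Int) (k : Int) : (pyInc l k).length = l.length := by
  simp [pyInc, PySem.List.length_pySetD]

lemma foldl_pyInc_length (ks : List Int) : ∀ (l : List Int), (ks.foldl pyInc l).length = l.length := by
  induction ks with
  | nil => intro l; rfl
  | cons k ks ih => intro l; rw [List.foldl_cons, ih, length_pyInc]

lemma length_vadd (u v : List Int) (h : u.length = v.length) : (vadd u v).length = v.length := by
  simp [vadd, h]

-- adding the zero vector on the right is the identity
lemma vadd_zero_right (u : List Int) : vadd u (List.replicate u.length 0) = u := by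
  induction u with
  | nil => rfl
  | cons x xs ih =>
    simp only [vadd, List.length_cons, List.replicate_succ, List.zipWith_cons_cons, add_zero] at *
    rw [ih]

-- incrementing a cell of a sum = adding to the sum the increment of the right summand
lemma pyInc_vadd (u v : List Int) (k : Int) (h : u.length = v.length)
    (h1 : -(v.length:Int) ≤ k) (h2 : k < v.length) :
    pyInc (vadd u v) k = vadd u (pyInc v k) := by
  have hl : (vadd u v).length = v.length := length_vadd u v h
  have hjlt : (k % (v.length:Int)).toNat < v.length := by
    have h0 : 0 ≤ k % (v.length:Int) := Int.emod_nonneg k (by omega)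
    have hlt : k % (v.length:Int) < v.length := Int.emod_lt_of_pos k (by omega)
    omega
  rw [pyInc_eq_set (vadd u v) k (by rw [hl]; exact h1) (by rw [hl]; exact h2),
    pyInc_eq_set v k h1 h2, hl]
  apply List.ext_getElem
  · simp [vadd, List.length_set, h]
  · intro i hi1 hi2
    have hiv : i < v.length := by simpa [vadd, h] using hi1
    have hiu : i < u.length := by omega
    rw [List.getElem_set]
    simp only [vadd, List.getElem_zipWith, List.getElem_set]
    by_cases hik : (k % (v.length:Int)).toNat = i
    · subst hik
      rw [if_pos rfl, if_pos rfl]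
      rw [List.getD_eq_getElem _ _ (show (k % (v.length:Int)).toNat
            < (List.zipWith (· + ·) u v).length by simp only [List.length_zipWith]; omega)]
      rw [List.getElem_zipWith]
      have hgd : v.getD (k % (v.length:Int)).toNat 0 = v[(k % (v.length:Int)).toNat] :=
        List.getD_eq_getElem _ _ hjlt
      simp only [hgd]
      ring
    · rw [if_neg hik, if_neg hik]

-- one_hot(size, k) is exactly one increment into the zero table
lemma oneHot_eq_pyInc_zero (size k : Int) :
    oneHot size k = pyInc (List.replicate size.toNat 0) k := by
  have hget : PySem.List.pyGetD (List.replicate size.toNat (0:Int)) k 0 = 0 := by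
    simp only [PySem.List.pyGetD, PySem.List.pyGet?, List.length_replicate]
    cases h : PySem.List.pyIdx? size.toNat k with
    | none => simp
    | some j =>
      have hj : j < size.toNat := by
        simp only [PySem.List.pyIdx?] at h; split_ifs at h <;> simp at h <;> omega
      simp [hj]
  simp [oneHot, pyInc, hget]

-- adding a one-hot to a table of the same size = incrementing that table
lemma vadd_oneHot (cs : List Int) (m k : Int) (hlen : cs.length = m.toNat)
    (h1 : -m ≤ k) (h2 : k < m) (hm : 1 ≤ m) :
    vadd cs (oneHot m k) = pyInc cs k := by
  have hb1 : -((List.replicate m.toNat (0:Int)).length : Int) ≤ k := by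
    simp only [List.length_replicate]; omega
  have hb2 : k < ((List.replicate m.toNat (0:Int)).length : Int) := by
    simp only [List.length_replicate]; omega
  rw [oneHot_eq_pyInc_zero, ← pyInc_vadd cs (List.replicate m.toNat 0) k (by simp [hlen]) hb1 hb2]
  rw [← hlen, vadd_zero_right]

-- folding increments starting from a sum = the sum with the increments folded into the right summand
lemma foldl_pyInc_vadd (ks : List Int) : ∀ (u v : List Int), u.length = v.length →
    (∀ k ∈ ks, -(v.length:Int) ≤ k ∧ k < v.length) →
    ks.foldl pyInc (vadd u v) = vadd u (ks.foldl pyInc v) := by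
  induction ks with
  | nil => intro u v _ _; rfl
  | cons k ks ih =>
    intro u v h hb
    have hp := hb k (List.mem_cons_self ..)
    rw [List.foldl_cons, List.foldl_cons, pyInc_vadd u v k h hp.1 hp.2,
      ih u (pyInc v k) (by rw [length_pyInc]; exact h)
        (by rw [length_pyInc]; exact fun q hq => hb q (List.mem_cons_of_mem _ hq))]

-- merging two histograms over the same keyspace = folding the concatenated keys
lemma foldl_pyInc_append (m : Int) (ks1 ks2 : List Int)
    (hb : ∀ k ∈ ks1 ++ ks2, -((m.toNat:Nat):Int) ≤ k ∧ k < ((m.toNat:Nat):Int)) :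
    (ks1 ++ ks2).foldl pyInc (List.replicate m.toNat 0)
      = vadd (ks1.foldl pyInc (List.replicate m.toNat 0))
             (ks2.foldl pyInc (List.replicate m.toNat 0)) := by
  have hlen1 : (ks1.foldl pyInc (List.replicate m.toNat (0:Int))).length = m.toNat := by
    rw [foldl_pyInc_length, List.length_replicate]
  have hz : vadd (ks1.foldl pyInc (List.replicate m.toNat 0)) (List.replicate m.toNat 0)
      = ks1.foldl pyInc (List.replicate m.toNat 0) := by
    have h := vadd_zero_right (ks1.foldl pyInc (List.replicate m.toNat 0))
    rwa [hlen1] at h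
  calc (ks1 ++ ks2).foldl pyInc (List.replicate m.toNat 0)
      = ks2.foldl pyInc (ks1.foldl pyInc (List.replicate m.toNat 0)) := List.foldl_append
    _ = ks2.foldl pyInc (vadd (ks1.foldl pyInc (List.replicate m.toNat 0))
          (List.replicate m.toNat 0)) := by rw [hz]
    _ = vadd (ks1.foldl pyInc (List.replicate m.toNat 0))
          (ks2.foldl pyInc (List.replicate m.toNat 0)) := by
        apply foldl_pyInc_vadd ks2 _ _ (by simp [hlen1])
        intro k hk
        have := hb k (List.mem_append_right _ hk)
        simpa using this

-- the words-side key of a tweet, the chars-side key of a word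
def keyW (t : List String) : Int := PySem.List.len t - 1
def keyC (w : String) : Int := PySem.Str.len w - 1

-- the reference (A-shaped) histograms of a list of tweets
def histW (mw : Int) (ts : List (List String)) : List Int :=
  (ts.map keyW).foldl pyInc (List.replicate mw.toNat 0)
def histC (mc : Int) (ts : List (List String)) : List Int :=
  ((ts.flatMap (fun t => t)).map keyC).foldl pyInc (List.replicate mc.toNat 0)

lemma histW_append (mw : Int) (s1 s2 : List (List String))
    (hb : ∀ t ∈ s1 ++ s2, -((mw.toNat:Nat):Int) ≤ keyW t ∧ keyW t < ((mw.toNat:Nat):Int)) :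
    histW mw (s1 ++ s2) = vadd (histW mw s1) (histW mw s2) := by
  unfold histW
  rw [List.map_append]
  apply foldl_pyInc_append
  intro k hk
  rcases List.mem_append.mp hk with hk | hk <;>
    obtain ⟨t, ht, rfl⟩ := List.mem_map.mp hk
  · exact hb t (List.mem_append_left _ ht)
  · exact hb t (List.mem_append_right _ ht)

lemma histC_append (mc : Int) (s1 s2 : List (List String))
    (hb : ∀ t ∈ s1 ++ s2, ∀ w ∈ t, -((mc.toNat:Nat):Int) ≤ keyC w ∧ keyC w < ((mc.toNat:Nat):Int)) :
    histC mc (s1 ++ s2) = vadd (histC mc s1) (histC mc s2) := by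
  unfold histC
  rw [List.flatMap_append, List.map_append]
  apply foldl_pyInc_append
  intro k hk
  rcases List.mem_append.mp hk with hk | hk <;>
    obtain ⟨w, hw, rfl⟩ := List.mem_map.mp hk <;>
    obtain ⟨t, ht, hwt⟩ := List.mem_flatMap.mp hw
  · exact hb t (List.mem_append_left _ ht) w hwt
  · exact hb t (List.mem_append_right _ ht) w hwt

-- the chars loop of B's singleton case, against the reference fold
lemma charFold_eq (mc : Int) (ws : List String)
    (hws : ∀ w ∈ ws, (1:Int) ≤ mc ∧ PySem.Str.len w ≤ mc) : ∀ (cs : List Int), cs.length = mc.toNat →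
    ws.foldl (fun cs word => vadd cs (oneHot mc (PySem.Str.len word - 1))) cs
      = (ws.map keyC).foldl pyInc cs := by
  induction ws with
  | nil => intro cs _; rfl
  | cons w ws ih =>
    intro cs hcs
    have hw := hws w (List.mem_cons_self ..)
    have hkey : PySem.Str.len w - 1 = keyC w := rfl
    rw [List.map_cons, List.foldl_cons, List.foldl_cons,
      vadd_oneHot cs mc _ hcs
        (by
          have h0 : (0:Int) ≤ PySem.Str.len w := by simp [PySem.Str.len_eq]
          omega)
        (by omega) hw.1, hkey,
      ih (fun q hq => hws q (List.mem_cons_of_mem _ hq)) (pyInc cs (keyC w))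
        (by rw [length_pyInc]; exact hcs)]

-- A's paired fold splits into two independent folds.
lemma foldl_pair_split (tw : List (List String)) : ∀ (a b : List Int),
    tw.foldl (fun st tweet =>
        (pyInc st.1 (PySem.List.len tweet - 1),
         tweet.foldl (fun cs word => pyInc cs (PySem.Str.len word - 1)) st.2)) (a, b)
      = (tw.foldl (fun x tweet => pyInc x (PySem.List.len tweet - 1)) a,
         tw.foldl (fun x tweet =>
            tweet.foldl (fun cs word => pyInc cs (PySem.Str.len word - 1)) x) b) := by
  induction tw with
  | nil => intro a b; rfl
  | cons t ts ih => intro a b; simp only [List.foldl_cons]; exact ih _ _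

-- the central invariant: go(lo, hi) computes the reference histograms of tweets_tokd[lo:hi]
lemma gldGo_eq (tw : List (List String)) (mw mc : Int)
    (hpre : Pre_get_lengths_distrs tw (mw, mc)) :
    ∀ (n : Nat) (lo hi : Int), (hi - lo).toNat = n → 0 ≤ lo → lo ≤ hi → hi ≤ tw.length →
    gldGo tw mw mc lo hi
      = (histW mw ((tw.drop lo.toNat).take (hi - lo).toNat),
         histC mc ((tw.drop lo.toNat).take (hi - lo).toNat)) := by
  intro n
  induction n using Nat.strong_induction_on with
  | _ n ih =>
    intro lo hi hn h0 hlh hhi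
    have hsubmem : ∀ t ∈ (tw.drop lo.toNat).take (hi - lo).toNat, t ∈ tw := by
      intro t ht
      exact List.mem_of_mem_drop (List.mem_of_mem_take ht)
    rw [gldGo]
    by_cases hle : hi - lo ≤ 0
    · rw [dif_pos hle]
      have h00 : (hi - lo).toNat = 0 := by omega
      simp [h00, histW, histC]
    · rw [dif_neg hle]
      by_cases h1 : hi - lo = 1
      · rw [dif_pos h1]
        have hlo : lo.toNat < tw.length := by omega
        have hget : PySem.List.pyGetD tw lo [] = tw[lo.toNat] :=
          PySem.List.pyGetD_eq_getElem tw [] h0 (by omega)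
        have hsub : (tw.drop lo.toNat).take (hi - lo).toNat = [tw[lo.toNat]] := by
          rw [h1, List.drop_eq_getElem_cons hlo]
          rfl
        have hpt := hpre tw[lo.toNat] (List.getElem_mem hlo)
        rw [hsub]
        refine Prod.ext ?_ ?_
        · simp only [hget, histW, List.map_cons, List.map_nil, List.foldl_cons, List.foldl_nil]
          rw [oneHot_eq_pyInc_zero]
          rfl
        · simp only [hget, histC, List.flatMap_cons, List.flatMap_nil, List.append_nil]
          exact charFold_eq mc tw[lo.toNat] hpt.2 _ (by simp)
      · rw [dif_neg h1]
        have hm := pvMid_bounds lo hi hle h1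
        set mid := PySem.Int.floordiv (lo + hi) 2 with hmid
        have e1 := ih (mid - lo).toNat (by omega) lo mid rfl h0 (by omega) (by omega)
        have e2 := ih (hi - mid).toNat (by omega) mid hi rfl (by omega) (by omega) hhi
        have hsplit : (tw.drop lo.toNat).take (hi - lo).toNat
            = (tw.drop lo.toNat).take (mid - lo).toNat
              ++ (tw.drop mid.toNat).take
                  (hi - mid).toNat := by
          have hadd : (hi - lo).toNat
              = (mid - lo).toNat
                + (hi - mid).toNat := by omega
          have h2' : lo.toNat + (mid - lo).toNat = mid.toNat := by omega
          rw [hadd, List.take_add, List.drop_drop, h2']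
        have hbW : ∀ t ∈ (tw.drop lo.toNat).take (mid - lo).toNat
              ++ (tw.drop mid.toNat).take
                  (hi - mid).toNat,
            -((mw.toNat:Nat):Int) ≤ keyW t ∧ keyW t < ((mw.toNat:Nat):Int) := by
          intro t ht
          have htw : t ∈ tw := by
            rw [← hsplit] at ht
            exact hsubmem t ht
          have h := (hpre t htw).1
          have hlen : (0:Int) ≤ PySem.List.len t := by simp [PySem.List.len_eq]
          unfold keyW
          omega
        have hbC : ∀ t ∈ (tw.drop lo.toNat).take (mid - lo).toNat
              ++ (tw.drop mid.toNat).take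
                  (hi - mid).toNat,
            ∀ w ∈ t, -((mc.toNat:Nat):Int) ≤ keyC w ∧ keyC w < ((mc.toNat:Nat):Int) := by
          intro t ht w hw
          have htw : t ∈ tw := by
            rw [← hsplit] at ht
            exact hsubmem t ht
          have h := (hpre t htw).2 w hw
          have hlen : (0:Int) ≤ PySem.Str.len w := by simp [PySem.Str.len_eq]
          unfold keyC
          omega
        show (vadd (gldGo tw mw mc lo mid).1 (gldGo tw mw mc mid hi).1,
              vadd (gldGo tw mw mc lo mid).2 (gldGo tw mw mc mid hi).2)
            = (histW mw ((tw.drop lo.toNat).take (hi - lo).toNat),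
               histC mc ((tw.drop lo.toNat).take (hi - lo).toNat))
        rw [e1, e2, hsplit, histW_append mw _ _ hbW, histC_append mc _ _ hbC]

-- ===== VERDICT (by name: the statement is the Claim_ definition above) =====
theorem get_lengths_distrs_spec : Claim_equal_get_lengths_distrs := by
  intro tw ml _hdom hpre
  unfold Spec_get_lengths_distrs get_lengths_distrs get_lengths_distrs_alt
  simp only []
  rw [foldl_pair_split]
  have hgo := gldGo_eq tw ml.1 ml.2 (by exact hpre) (tw.length) 0 (tw.length : Int)
    (by simp) (by omega) (by omega) (by omega)
  rw [PySem.List.len_eq, hgo]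
  simp only [Int.toNat_natCast, Int.sub_zero, Int.toNat_zero, List.drop_zero, List.take_length]
  refine Prod.ext ?_ ?_
  · simp only [histW]
    rw [List.foldl_map]
    simp only [keyW]
  · simp only [histC]
    rw [List.foldl_map, ← List.foldl_flatMap]
    simp only [keyC]
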